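-- pv_equiv track=rewrite | github.com/jorgearanda/advent-of-code-2024 | day09.py | interfile_space
-- ===== SOURCE A (Python) =====
-- def interfile_space(disk):
--     in_gap = False
--     previously_in_gap = False
--     for i in range(len(disk)):
--         if disk[i] is None:
--             if previously_in_gap:
--                 return True
--             in_gap = True
--         elif in_gap:
--             previously_in_gap = True
--             in_gap = False
--     return False
-- ===== SOURCE B (Python) =====
-- def interfile_space(disk):
--     # Run-length-encode the disk into alternating gap/file runs, then ask
--     # whether at least two gap runs exist.
--     runs = []
--     for x in disk:
--         k = x is None
--         if not runs or runs[-1] != k: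
--             runs.append(k)
--     return runs.count(True) >= 2
-- ===== Notes on version B (the rewrite author's own statement) =====
-- stated objective: alternative
-- what changed: Replaced the two-flag state machine with early return by run-length grouping of the disk into gap/file runs followed by counting gap runs (>= 2).
import Mathlib
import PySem

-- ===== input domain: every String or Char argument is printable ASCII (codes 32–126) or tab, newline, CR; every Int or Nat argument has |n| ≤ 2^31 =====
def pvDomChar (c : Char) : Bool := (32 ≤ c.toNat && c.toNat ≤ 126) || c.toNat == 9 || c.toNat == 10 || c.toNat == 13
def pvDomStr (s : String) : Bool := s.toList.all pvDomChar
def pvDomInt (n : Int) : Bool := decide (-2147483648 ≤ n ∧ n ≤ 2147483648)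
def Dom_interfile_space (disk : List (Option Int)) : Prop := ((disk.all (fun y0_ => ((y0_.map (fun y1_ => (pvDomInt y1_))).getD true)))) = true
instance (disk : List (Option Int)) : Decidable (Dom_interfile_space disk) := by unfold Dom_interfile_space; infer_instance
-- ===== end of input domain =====

-- B groups the disk into alternating gap/file runs and counts gap runs; A is a two-flag automaton.

-- ===== PORT A =====
-- the for-loop over disk with the two flags and early 'return True'
def interfileA_go : List (Option Int) → Bool → Bool → Bool
  | [], _, _ => false
  | x :: xs, in_gap, previously_in_gap =>
    match x with
    | none =>
      if previously_in_gap then true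
      else interfileA_go xs true previously_in_gap
    | some _ =>
      if in_gap then interfileA_go xs false true
      else interfileA_go xs in_gap previously_in_gap

def interfile_space (disk : List (Option Int)) : Bool :=
  interfileA_go disk false false

-- ===== PORT B =====
-- the run-length-encoding loop of Source B: append k when runs is empty or runs[-1] != k
def rleStep (runs : List Bool) (x : Option Int) : List Bool :=
  let k := x.isNone
  if runs.isEmpty || runs.getLast? != some k then runs ++ [k] else runs

def interfile_space_alt (disk : List (Option Int)) : Bool :=
  ((disk.foldl rleStep []).count true) ≥ 2

-- ===== PRECONDITION & SPEC =====
def Spec_interfile_space (disk : List (Option Int)) (out : Bool) : Prop := out = interfile_space_alt disk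
instance (disk : List (Option Int)) (out : Bool) : Decidable (Spec_interfile_space disk out) := by unfold Spec_interfile_space; infer_instance

-- ===== CLAIM (what is proved, stated in full; the proofs are below) =====
def Claim_equal_interfile_space : Prop := ∀ (disk : List (Option Int)), Dom_interfile_space disk → Spec_interfile_space disk (interfile_space disk)

-- ===== LEMMAS AND PROOFS =====

-- number of maximal None-runs in xs, given whether we are currently inside a gap
def gaps : List (Option Int) → Bool → Nat
  | [], _ => 0
  | none :: xs, g => (if g then 0 else 1) + gaps xs true
  | some _ :: xs, _ => gaps xs false

lemma interfileA_go_gaps : ∀ xs : List (Option Int),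
    (interfileA_go xs false false = decide (gaps xs false ≥ 2)) ∧
    (interfileA_go xs true false = decide (1 + gaps xs true ≥ 2)) ∧
    (interfileA_go xs false true = decide (1 + gaps xs false ≥ 2)) := by
  intro xs
  induction xs with
  | nil => simp [interfileA_go, gaps]
  | cons x xs ih =>
    obtain ⟨h1, h2, h3⟩ := ih
    cases x with
    | none =>
      refine ⟨?_, ?_, ?_⟩ <;> simp [interfileA_go, gaps, h2] <;> omega
    | some v =>
      refine ⟨?_, ?_, ?_⟩ <;> simp [interfileA_go, gaps, h1, h3]

lemma foldl_rleStep_count : ∀ (xs : List (Option Int)) (runs : List Bool),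
    ((List.foldl rleStep runs xs).count true)
      = runs.count true + gaps xs (runs.getLast? == some true) := by
  intro xs
  induction xs with
  | nil => intro runs; simp [gaps]
  | cons x xs ih =>
    intro runs
    cases x with
    | none =>
      by_cases h : runs.getLast? = some true
      · have : rleStep runs none = runs := by
          simp [rleStep, h]
          rcases runs with _ | _ <;> simp_all
        simp [List.foldl, this, ih, h, gaps]
      · have hstep : rleStep runs none = runs ++ [true] := by
          simp [rleStep]
          intro hne
          simp_all
        simp [List.foldl, hstep, ih, gaps, h, List.count_append]
        omega
    | some v =>
      by_cases h : runs.getLast? = some false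
      · have : rleStep runs (some v) = runs := by
          simp [rleStep, h]
          rcases runs with _ | _ <;> simp_all
        have hne : ¬ (runs.getLast? = some true) := by simp [h]
        simp [List.foldl, this, ih, hne, gaps, h]
      · have hstep : rleStep runs (some v) = runs ++ [false] := by
          simp [rleStep]
          intro hne
          simp_all
        simp [List.foldl, hstep, ih, gaps, h, List.count_append]

-- ===== VERDICT (by name: the statement is the Claim_ definition above) =====
theorem interfile_space_spec : Claim_equal_interfile_space := by
  intro disk _
  unfold Spec_interfile_space interfile_space interfile_space_alt
  rw [(interfileA_go_gaps disk).1, foldl_rleStep_count disk []]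
  simp [gaps]
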